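-- pv_equiv track=rewrite | github.com/ashokgaire/codeForces | 1/arrays/longest_span.py | longestCommonSum
-- ===== SOURCE A (Python) =====
-- def longestCommonSum(arr1, arr2, n):
--     maxlen = 0
--     diff = {}
--     sum1 = 0
--     sum2 = 0
--     for i in range(n):
--         sum1 +=arr1[i]
--         sum2 += arr2[i]
--
--         difflen = sum1 - sum2
--
--         if difflen == 0:
--             maxlen = i + 1
--
--         elif difflen not in diff:
--             diff[difflen] = i
--         else:
--             length = i - diff[difflen]
--             maxlen = max(length, maxlen)
--
--     return maxlen
-- ===== SOURCE B (Python) =====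
-- def longestCommonSum(arr1, arr2, n):
--     # Brute-force double loop: for every start s, scan ends e with a running
--     # difference accumulator; a zero accumulator means equal subsums on [s, e].
--     maxlen = 0
--     for s in range(n):
--         acc = 0
--         for e in range(s, n):
--             acc += arr1[e] - arr2[e]
--             if acc == 0:
--                 maxlen = max(maxlen, e - s + 1)
--     return maxlen
-- ===== Notes on version B (the rewrite author's own statement) =====
-- stated objective: alternative
-- what changed: Replaces A's single pass with a first-seen-difference dict by a dict-free nested double loop that rescans every start index with a running difference accumulator, taking the max span length whenever the accumulator is zero.
import Mathlib
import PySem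

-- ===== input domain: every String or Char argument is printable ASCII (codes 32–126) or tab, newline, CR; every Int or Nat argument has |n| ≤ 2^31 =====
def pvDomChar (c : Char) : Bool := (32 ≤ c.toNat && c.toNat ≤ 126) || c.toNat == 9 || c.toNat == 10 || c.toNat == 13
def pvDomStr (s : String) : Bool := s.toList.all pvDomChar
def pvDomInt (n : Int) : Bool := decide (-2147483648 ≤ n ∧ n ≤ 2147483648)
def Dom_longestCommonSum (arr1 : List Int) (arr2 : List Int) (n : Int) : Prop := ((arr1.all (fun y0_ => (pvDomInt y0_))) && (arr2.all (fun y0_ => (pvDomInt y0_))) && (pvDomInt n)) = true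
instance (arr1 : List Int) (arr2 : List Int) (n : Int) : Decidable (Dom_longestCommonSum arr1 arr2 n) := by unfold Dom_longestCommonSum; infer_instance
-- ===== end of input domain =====

-- B replaces A's one-pass first-seen-difference dict by a dict-free nested double loop
-- over all start indices with a running difference accumulator (objective: alternative).

-- ===== PORT A =====
-- loop body of A's single for-loop: state (maxlen, diff, sum1, sum2)
def lcsBodyA (arr1 arr2 : List Int) (st : Int × PySem.Dict Int Int × Int × Int)
    (i : Int) : Int × PySem.Dict Int Int × Int × Int :=
  let maxlen := st.1
  let diff := st.2.1
  let sum1 := st.2.2.1 + PySem.List.pyGetD arr1 i 0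
  let sum2 := st.2.2.2 + PySem.List.pyGetD arr2 i 0
  let difflen := sum1 - sum2
  if difflen = 0 then (i + 1, diff, sum1, sum2)
  else if diff.contains difflen = false then (maxlen, diff.insert difflen i, sum1, sum2)
  else (max (i - (diff.get? difflen).getD 0) maxlen, diff, sum1, sum2)

def longestCommonSum (arr1 : List Int) (arr2 : List Int) (n : Int) : Int :=
  ((PySem.List.pyRange 0 n 1).foldl (lcsBodyA arr1 arr2)
      (0, PySem.Dict.empty, 0, 0)).1

-- ===== PORT B =====
-- inner loop of B: running accumulator over e ∈ range(s, n); state (maxlen, acc)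
def lcsInnerB (arr1 arr2 : List Int) (s : Int) (st : Int × Int) (e : Int) : Int × Int :=
  let acc := st.2 + (PySem.List.pyGetD arr1 e 0 - PySem.List.pyGetD arr2 e 0)
  if acc = 0 then (max st.1 (e - s + 1), acc) else (st.1, acc)

def longestCommonSum_alt (arr1 : List Int) (arr2 : List Int) (n : Int) : Int :=
  (PySem.List.pyRange 0 n 1).foldl
    (fun maxlen s => ((PySem.List.pyRange s n 1).foldl (lcsInnerB arr1 arr2 s) (maxlen, 0)).1) 0

-- ===== PRECONDITION & SPEC =====
-- Pre_ excludes exactly the inputs where Python A raises IndexError (n exceeds a list's length).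
def Pre_longestCommonSum (arr1 : List Int) (arr2 : List Int) (n : Int) : Prop :=
  n ≤ (arr1.length : Int) ∧ n ≤ (arr2.length : Int)
instance (arr1 : List Int) (arr2 : List Int) (n : Int) : Decidable (Pre_longestCommonSum arr1 arr2 n) := by
  unfold Pre_longestCommonSum; infer_instance

def pvWitness_longestCommonSum : List Int × List Int × Int := ([1, 2, 3], [3, 2, 1], 3)

def Spec_longestCommonSum (arr1 : List Int) (arr2 : List Int) (n : Int) (out : Int) : Prop := out = longestCommonSum_alt arr1 arr2 n
instance (arr1 : List Int) (arr2 : List Int) (n : Int) (out : Int) : Decidable (Spec_longestCommonSum arr1 arr2 n out) := by unfold Spec_longestCommonSum; infer_instance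

-- ===== CLAIM (what is proved, stated in full; the proofs are below) =====
def Claim_equal_longestCommonSum : Prop := ∀ (arr1 : List Int) (arr2 : List Int) (n : Int), Dom_longestCommonSum arr1 arr2 n → Pre_longestCommonSum arr1 arr2 n → Spec_longestCommonSum arr1 arr2 n (longestCommonSum arr1 arr2 n)

-- ===== LEMMAS AND PROOFS =====

-- reference prefix sums
def refS1 (a : List Int) : Nat → Int
  | 0 => 0
  | k + 1 => refS1 a k + PySem.List.pyGetD a (k : Int) 0

def refS (a b : List Int) (k : Nat) : Int := refS1 a k - refS1 b k

def prefL (a b : List Int) (k : Nat) : List Int :=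
  (List.range k).map (fun j => refS a b (j + 1))

-- span contribution ending at k in A (first-occurrence form)
def gC (a b : List Int) (k : Nat) : Int :=
  if refS a b (k + 1) = 0 then (k : Int) + 1
  else (k : Int) - (((PySem.List.index? (prefL a b (k + 1)) (refS a b (k + 1))).getD 0 : Nat) : Int)

def refM (a b : List Int) : Nat → Int
  | 0 => 0
  | k + 1 => max (refM a b k) (gC a b k)

-- span value of the window [s, e] in B's brute-force view
def valB (a b : List Int) (s e : Nat) : Int :=
  if refS a b (e + 1) = refS a b s then (e : Int) - (s : Int) + 1 else 0

def bestFrom (a b : List Int) (s : Nat) : Nat → Int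
  | 0 => 0
  | m + 1 => max (bestFrom a b s m) (valB a b s (s + m))

def refB (a b : List Int) (N : Nat) : Nat → Int
  | 0 => 0
  | k + 1 => max (refB a b N k) (bestFrom a b k (N - k))

theorem refS_succ (a b : List Int) (k : Nat) :
    refS a b (k + 1) = refS a b k + (PySem.List.pyGetD a (k : Int) 0 - PySem.List.pyGetD b (k : Int) 0) := by
  simp [refS, refS1]; ring

theorem prefL_succ (a b : List Int) (k : Nat) :
    prefL a b (k + 1) = prefL a b k ++ [refS a b (k + 1)] := by
  simp [prefL, List.range_succ]

theorem length_prefL (a b : List Int) (k : Nat) : (prefL a b k).length = k := by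
  simp [prefL]

theorem getElem_prefL (a b : List Int) (k j : Nat) (hj : j < k) :
    (prefL a b k)[j]'(by rw [length_prefL]; exact hj) = refS a b (j + 1) := by
  simp [prefL]

theorem refM_bounds (a b : List Int) (k : Nat) : 0 ≤ refM a b k ∧ refM a b k ≤ (k : Int) := by
  induction k with
  | zero => simp [refM]
  | succ k ih =>
    have hg : gC a b k ≤ (k : Int) + 1 := by
      unfold gC
      split_ifs with h
      · omega
      · have : (0 : Int) ≤ (((PySem.List.index? (prefL a b (k + 1)) (refS a b (k + 1))).getD 0 : Nat) : Int) := by positivity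
        omega
    simp only [refM]
    constructor
    · exact le_trans ih.1 (le_max_left _ _)
    · push_cast; exact max_le (by exact_mod_cast le_trans ih.2 (by omega)) hg

theorem index?_snoc_ne {α : Type} [DecidableEq α] (l : List α) (x v : α) (h : v ≠ x) :
    PySem.List.index? (l ++ [x]) v = PySem.List.index? l v := by
  by_cases hm : v ∈ l
  · exact PySem.List.index?_append_of_mem [x] hm
  · have h1 : PySem.List.index? (l ++ [x]) v = none := by
      rw [PySem.List.index?_eq_none_iff]
      simp [hm, h]
    have h2 : PySem.List.index? l v = none := by
      rw [PySem.List.index?_eq_none_iff]; exact hm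
    rw [h1, h2]

-- appending the next prefix value does not change any lookup that matters
theorem index?_prefL_succ (a b : List Int) (k : Nat) (v : Int)
    (h : v ∈ prefL a b k ∨ v ≠ refS a b (k + 1)) :
    PySem.List.index? (prefL a b (k + 1)) v = PySem.List.index? (prefL a b k) v := by
  rw [prefL_succ]
  rcases h with hm | hne
  · exact PySem.List.index?_append_of_mem _ hm
  · exact index?_snoc_ne _ _ _ hne

def dictInv (a b : List Int) (d : PySem.Dict Int Int) (k : Nat) : Prop :=
  ∀ v : Int, d.get? v =
    if v = 0 then none
    else (PySem.List.index? (prefL a b k) v).map (fun j => (j : Int))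

-- the invariant of A's fold over List.range k
theorem A_invariant (a b : List Int) (k : Nat) :
    ((List.range k).foldl (fun st (j : Nat) => lcsBodyA a b st (j : Int))
        (0, PySem.Dict.empty, 0, 0)).1 = refM a b k ∧
    ((List.range k).foldl (fun st (j : Nat) => lcsBodyA a b st (j : Int))
        (0, PySem.Dict.empty, 0, 0)).2.2.1 = refS1 a k ∧
    ((List.range k).foldl (fun st (j : Nat) => lcsBodyA a b st (j : Int))
        (0, PySem.Dict.empty, 0, 0)).2.2.2 = refS1 b k ∧
    dictInv a b ((List.range k).foldl (fun st (j : Nat) => lcsBodyA a b st (j : Int))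
        (0, PySem.Dict.empty, 0, 0)).2.1 k := by
  induction k with
  | zero =>
    refine ⟨rfl, rfl, rfl, ?_⟩
    intro v
    simp [prefL, PySem.Dict.get?_empty]
  | succ k ih =>
    obtain ⟨hM, h1, h2, hD⟩ := ih
    set st := (List.range k).foldl (fun st (j : Nat) => lcsBodyA a b st (j : Int))
        (0, PySem.Dict.empty, 0, 0) with hst
    rw [List.range_succ, List.foldl_append]
    simp only [List.foldl_cons, List.foldl_nil]
    have hdiff : (st.2.2.1 + PySem.List.pyGetD a (k : Int) 0) -
        (st.2.2.2 + PySem.List.pyGetD b (k : Int) 0) = refS a b (k + 1) := by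
      rw [h1, h2]; simp [refS, refS1]
    have hMb := refM_bounds a b k
    by_cases hz : refS a b (k + 1) = 0
    · -- difflen == 0 branch
      have : lcsBodyA a b st (k : Int) =
          ((k : Int) + 1, st.2.1, st.2.2.1 + PySem.List.pyGetD a (k : Int) 0,
            st.2.2.2 + PySem.List.pyGetD b (k : Int) 0) := by
        unfold lcsBodyA
        simp only [hdiff]
        rw [if_pos hz]
      rw [this]
      refine ⟨?_, by simp [refS1, h1], by simp [refS1, h2], ?_⟩
      · have hg : gC a b k = (k : Int) + 1 := by unfold gC; rw [if_pos hz]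
        simp only [refM, hg]
        have := hMb.2
        omega
      · intro v
        rw [hD v]
        by_cases hv : v = 0
        · simp [hv]
        · rw [if_neg hv, if_neg hv, index?_prefL_succ]
          right; rw [hz]; exact hv
    · -- difflen ≠ 0
      have hcont : st.2.1.contains (refS a b (k + 1)) =
          (PySem.List.index? (prefL a b k) (refS a b (k + 1))).isSome := by
        rw [PySem.Dict.contains_eq_isSome_get?, hD, if_neg hz]
        rcases PySem.List.index? (prefL a b k) (refS a b (k + 1)) with _ | j <;> simp
      by_cases hmem : refS a b (k + 1) ∈ prefL a b k
      · -- seen before: else-branch, maxlen updated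
        obtain ⟨j, hj⟩ : ∃ j, PySem.List.index? (prefL a b k) (refS a b (k + 1)) = some j := by
          have := (PySem.List.index?_isSome_iff (xs := prefL a b k)
            (v := refS a b (k + 1))).2 hmem
          exact Option.isSome_iff_exists.1 this
        have hget : st.2.1.get? (refS a b (k + 1)) = some (j : Int) := by
          rw [hD, if_neg hz, hj]; rfl
        have : lcsBodyA a b st (k : Int) =
            (max ((k : Int) - (j : Int)) st.1, st.2.1,
              st.2.2.1 + PySem.List.pyGetD a (k : Int) 0,
              st.2.2.2 + PySem.List.pyGetD b (k : Int) 0) := by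
          unfold lcsBodyA
          simp only [hdiff, if_neg hz, hcont, hj, Option.isSome_some, hget]
          simp
        rw [this]
        refine ⟨?_, by simp [refS1, h1], by simp [refS1, h2], ?_⟩
        · have hg : gC a b k = (k : Int) - (j : Int) := by
            unfold gC
            rw [if_neg hz, index?_prefL_succ a b k _ (Or.inl hmem), hj]
            rfl
          rw [hM]
          simp only [refM, hg]
          omega
        · intro v
          rw [hD v]
          by_cases hv : v = 0
          · simp [hv]
          · rw [if_neg hv, if_neg hv, index?_prefL_succ]
            by_cases hvv : v = refS a b (k + 1)
            · left; rw [hvv]; exact hmem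
            · right; exact hvv
      · -- first time seen: insert branch
        have hnone : PySem.List.index? (prefL a b k) (refS a b (k + 1)) = none := by
          rw [PySem.List.index?_eq_none_iff]; exact hmem
        have : lcsBodyA a b st (k : Int) =
            (st.1, st.2.1.insert (refS a b (k + 1)) (k : Int),
              st.2.2.1 + PySem.List.pyGetD a (k : Int) 0,
              st.2.2.2 + PySem.List.pyGetD b (k : Int) 0) := by
          unfold lcsBodyA
          simp only [hdiff, if_neg hz, hcont, hnone, Option.isSome_none]
          simp
        rw [this]
        refine ⟨?_, by simp [refS1, h1], by simp [refS1, h2], ?_⟩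
        · have hg : gC a b k = (k : Int) - (k : Int) := by
            unfold gC
            rw [if_neg hz, prefL_succ,
              PySem.List.index?_append_singleton_self _ _ hmem, length_prefL]
            rfl
          rw [hM]
          simp only [refM, hg]
          have := hMb.1
          omega
        · intro v
          rw [PySem.Dict.get?_insert]
          by_cases hvv : v = refS a b (k + 1)
          · rw [if_pos hvv, hvv, if_neg hz, prefL_succ,
              PySem.List.index?_append_singleton_self _ _ hmem, length_prefL]
            rfl
          · rw [if_neg hvv, hD v]
            by_cases hv : v = 0
            · simp [hv]
            · rw [if_neg hv, if_neg hv, index?_prefL_succ a b k v (Or.inr hvv)]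

-- ----- B-side reference lemmas -----

theorem bestFrom_nonneg (a b : List Int) (s m : Nat) : 0 ≤ bestFrom a b s m := by
  induction m with
  | zero => simp [bestFrom]
  | succ m ih => simp only [bestFrom]; exact le_trans ih (le_max_left _ _)

theorem refB_nonneg (a b : List Int) (N k : Nat) : 0 ≤ refB a b N k := by
  induction k with
  | zero => simp [refB]
  | succ k ih => simp only [refB]; exact le_trans ih (le_max_left _ _)

theorem valB_le_bestFrom (a b : List Int) (s m' m : Nat) (h : m' < m) :
    valB a b s (s + m') ≤ bestFrom a b s m := by
  induction m with
  | zero => omega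
  | succ m ih =>
    simp only [bestFrom]
    by_cases hm : m' = m
    · subst hm; exact le_max_right _ _
    · exact le_trans (ih (by omega)) (le_max_left _ _)

theorem bestFrom_le (a b : List Int) (s m : Nat) (X : Int) (h0 : 0 ≤ X)
    (h : ∀ m', m' < m → valB a b s (s + m') ≤ X) : bestFrom a b s m ≤ X := by
  induction m with
  | zero => simpa [bestFrom] using h0
  | succ m ih =>
    simp only [bestFrom]
    exact max_le (ih (fun m' hm => h m' (by omega))) (h m (by omega))

theorem bestFrom_le_refB (a b : List Int) (N s k : Nat) (h : s < k) :
    bestFrom a b s (N - s) ≤ refB a b N k := by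
  induction k with
  | zero => omega
  | succ k ih =>
    simp only [refB]
    by_cases hs : s = k
    · subst hs; exact le_max_right _ _
    · exact le_trans (ih (by omega)) (le_max_left _ _)

theorem refB_le (a b : List Int) (N k : Nat) (X : Int) (h0 : 0 ≤ X)
    (h : ∀ s, s < k → bestFrom a b s (N - s) ≤ X) : refB a b N k ≤ X := by
  induction k with
  | zero => simpa [refB] using h0
  | succ k ih =>
    simp only [refB]
    exact max_le (ih (fun s hs => h s (by omega))) (h k (by omega))

theorem gC_le_refM (a b : List Int) (e N : Nat) (h : e < N) : gC a b e ≤ refM a b N := by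
  induction N with
  | zero => omega
  | succ N ih =>
    simp only [refM]
    by_cases he : e = N
    · subst he; exact le_max_right _ _
    · exact le_trans (ih (by omega)) (le_max_left _ _)

theorem refM_le (a b : List Int) (N : Nat) (X : Int) (h0 : 0 ≤ X)
    (h : ∀ e, e < N → gC a b e ≤ X) : refM a b N ≤ X := by
  induction N with
  | zero => simpa [refM] using h0
  | succ N ih =>
    simp only [refM]
    exact max_le (ih (fun e he => h e (by omega))) (h N (by omega))

-- the value refS (e+1) always occurs in prefL (e+1) (it is its last entry)
theorem self_mem_prefL (a b : List Int) (e : Nat) : refS a b (e + 1) ∈ prefL a b (e + 1) := by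
  rw [prefL_succ]; simp

-- every window value is at most A's first-occurrence span ending at e
theorem valB_le_gC (a b : List Int) (s e : Nat) (_hse : s ≤ e) : valB a b s e ≤ gC a b e := by
  unfold valB gC
  obtain ⟨j, hj⟩ : ∃ j, PySem.List.index? (prefL a b (e + 1)) (refS a b (e + 1)) = some j :=
    Option.isSome_iff_exists.1
      ((PySem.List.index?_isSome_iff _ _).2 (self_mem_prefL a b e))
  obtain ⟨hjlen, hjval, hjmin⟩ := PySem.List.getElem_of_index?_eq_some hj
  rw [length_prefL] at hjlen
  rw [getElem_prefL a b (e + 1) j hjlen] at hjval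
  by_cases hz : refS a b (e + 1) = 0
  · rw [if_pos hz]
    split_ifs with hv
    · omega
    · omega
  · rw [if_neg hz, hj]
    simp only [Option.getD_some]
    split_ifs with hv
    · -- refS (e+1) = refS s, so s ≥ 1 and the first occurrence j ≤ s - 1
      have hs1 : 1 ≤ s := by
        rcases Nat.eq_zero_or_pos s with h0 | h1
        · exfalso; apply hz; rw [hv, h0]; rfl
        · exact h1
      have hjle : j ≤ s - 1 := by
        by_contra hlt
        push Not at hlt
        have hs1e : s - 1 < e + 1 := by omega
        have := hjmin (s - 1) (by omega)
        apply this
        rw [getElem_prefL a b (e + 1) (s - 1) hs1e]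
        rw [show s - 1 + 1 = s from by omega, ← hv]
      have : (j : Int) ≤ (s : Int) - 1 := by omega
      omega
    · omega

-- A's span ending at e is realised by some window, hence bounded by any window bound
theorem gC_le (a b : List Int) (e : Nat) (X : Int) (h0 : 0 ≤ X)
    (h : ∀ s, s ≤ e → valB a b s e ≤ X) : gC a b e ≤ X := by
  unfold gC
  by_cases hz : refS a b (e + 1) = 0
  · rw [if_pos hz]
    have := h 0 (by omega)
    unfold valB at this
    rw [if_pos (by rw [hz]; rfl)] at this
    simpa using this
  · rw [if_neg hz]
    obtain ⟨j, hj⟩ : ∃ j, PySem.List.index? (prefL a b (e + 1)) (refS a b (e + 1)) = some j :=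
      Option.isSome_iff_exists.1
        ((PySem.List.index?_isSome_iff _ _).2 (self_mem_prefL a b e))
    obtain ⟨hjlen, hjval, _⟩ := PySem.List.getElem_of_index?_eq_some hj
    rw [length_prefL] at hjlen
    rw [getElem_prefL a b (e + 1) j hjlen] at hjval
    rw [hj]
    simp only [Option.getD_some]
    by_cases hje : j = e
    · subst hje; omega
    · have hlt : j + 1 ≤ e := by omega
      have := h (j + 1) hlt
      unfold valB at this
      rw [if_pos hjval.symm] at this
      push_cast at this
      omega

-- the triangle swap: A's max over ends equals B's max over starts
theorem refM_eq_refB (a b : List Int) (N : Nat) : refM a b N = refB a b N N := by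
  apply le_antisymm
  · apply refM_le a b N _ (refB_nonneg a b N N)
    intro e he
    apply gC_le a b e _ (refB_nonneg a b N N)
    intro s hs
    have h1 : valB a b s e ≤ bestFrom a b s (N - s) := by
      have := valB_le_bestFrom a b s (e - s) (N - s) (by omega)
      rwa [show s + (e - s) = e from by omega] at this
    exact le_trans h1 (bestFrom_le_refB a b N s N (by omega))
  · apply refB_le a b N N _ (refM_bounds a b N).1
    intro s hs
    apply bestFrom_le a b s (N - s) _ (refM_bounds a b N).1
    intro m' hm'
    exact le_trans (valB_le_gC a b s (s + m') (by omega)) (gC_le_refM a b (s + m') N (by omega))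

-- ----- bridging the B port to refB -----

-- inner fold of B over range(s, s+m) computes (max best0 (bestFrom s m), acc)
theorem B_inner (a b : List Int) (s m : Nat) (best0 : Int) (h0 : 0 ≤ best0) :
    (PySem.List.pyRange (s : Int) ((s : Int) + (m : Int)) 1).foldl
        (lcsInnerB a b (s : Int)) (best0, 0) =
      (max best0 (bestFrom a b s m), refS a b (s + m) - refS a b s) := by
  induction m with
  | zero =>
    rw [show (s : Int) + (0 : Nat) = (s : Int) from by push_cast; ring,
      PySem.List.pyRange_one_eq_nil (by omega)]
    simp [bestFrom, max_eq_left h0]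
  | succ m ih =>
    have hsplit : PySem.List.pyRange (s : Int) ((s : Int) + ((m : Nat) + 1 : Nat)) 1 =
        PySem.List.pyRange (s : Int) ((s : Int) + (m : Int)) 1 ++ [(s : Int) + (m : Int)] := by
      rw [show ((s : Int) + ((m : Nat) + 1 : Nat) : Int) = ((s : Int) + (m : Int)) + 1 from by
        push_cast; ring]
      exact PySem.List.pyRange_one_succ_right (by omega)
    rw [hsplit, List.foldl_append, ih]
    simp only [List.foldl_cons, List.foldl_nil, lcsInnerB]
    have hacc : refS a b (s + m) - refS a b s +
        (PySem.List.pyGetD a ((s : Int) + (m : Int)) 0 -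
          PySem.List.pyGetD b ((s : Int) + (m : Int)) 0) =
        refS a b (s + m + 1) - refS a b s := by
      rw [refS_succ a b (s + m)]
      push_cast
      ring
    simp only [hacc]
    by_cases hz : refS a b (s + m + 1) - refS a b s = 0
    · rw [if_pos hz]
      have hv : valB a b s (s + m) = ((s : Int) + (m : Int)) - (s : Int) + 1 := by
        unfold valB
        rw [if_pos (by omega)]
        push_cast; ring
      simp only [bestFrom, hv]
      rw [max_assoc]
      rfl
    · rw [if_neg hz]
      have hv : valB a b s (s + m) = 0 := by
        unfold valB
        rw [if_neg (by omega)]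
      simp only [bestFrom, hv]
      rw [max_eq_left (bestFrom_nonneg a b s m)]
      rfl

-- the outer fold of B over List.range N computes refB
theorem B_outer (a b : List Int) (n : Int) (N : Nat) (hN : n = (N : Int)) (k : Nat) (hk : k ≤ N) :
    (List.range k).foldl
        (fun maxlen (s : Nat) =>
          ((PySem.List.pyRange (s : Int) n 1).foldl (lcsInnerB a b (s : Int)) (maxlen, 0)).1) 0 =
      refB a b N k := by
  induction k with
  | zero => simp [refB]
  | succ k ih =>
    rw [List.range_succ, List.foldl_append, ih (by omega)]
    simp only [List.foldl_cons, List.foldl_nil]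
    have hn : n = (k : Int) + ((N - k : Nat) : Int) := by
      rw [hN]; push_cast; omega
    rw [hn, B_inner a b k (N - k) _ (refB_nonneg a b N k)]
    simp only [refB]

-- fold over pyRange 0 n 1 = fold over List.range n.toNat with cast indices
theorem foldl_pyRange_zero {β : Type} (n : Int) (f : β → Int → β) (init : β) :
    (PySem.List.pyRange 0 n 1).foldl f init =
      (List.range n.toNat).foldl (fun st (j : Nat) => f st (j : Int)) init := by
  rw [PySem.List.pyRange_one, List.foldl_map]
  simp

-- ===== VERDICT (by name: the statement is the Claim_ definition above) =====
theorem longestCommonSum_spec : Claim_equal_longestCommonSum := by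
  intro arr1 arr2 n _ _
  unfold Spec_longestCommonSum longestCommonSum longestCommonSum_alt
  rw [foldl_pyRange_zero, foldl_pyRange_zero]
  rw [(A_invariant arr1 arr2 n.toNat).1, refM_eq_refB]
  by_cases hn : 0 ≤ n
  · rw [B_outer arr1 arr2 n n.toNat (by omega) n.toNat le_rfl]
  · rw [show n.toNat = 0 from by omega]
    simp [refB]
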